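-- pv_equiv track=rewrite | github.com/canonical/mir | examples/miral-shell/spinner/png2header.py | tocstring
-- ===== SOURCE A (Python) =====
-- def tocstring(data):
--     result = ''
--     line_chars = 0
--     line_limit = 80
--
--     for c in data:
--         if line_chars == 0:
--             result += '    "'
--
--         s = '\\%o' % c
--         result += s
--         line_chars += len(s)
--
--         if line_chars >= line_limit:
--             result += '"\n'
--             line_chars = 0
--
--     if line_chars != 0:
--         result += '"'
--
--     return result
-- ===== SOURCE B (Python) =====
-- def tocstring(data):
--     # Line-at-a-time: precompute escapes, then an outer loop that for each line
--     # scans ahead to find its break index, slices that line out, and renders it.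
--     escapes = ['\\%o' % c for c in data]
--     n = len(escapes)
--     out = []
--     i = 0
--     while i < n:
--         total = 0
--         j = i
--         while j < n and total < 80:
--             total += len(escapes[j])
--             j += 1
--         out.append('    "' + ''.join(escapes[i:j])
--                    + ('"\n' if total >= 80 else '"'))
--         i = j
--     return ''.join(out)
-- ===== Notes on version B (the rewrite author's own statement) =====
-- stated objective: alternative
-- what changed: A makes one char-by-char stateful pass interleaving formatting and line bookkeeping; B precomputes the escapes, then an outer loop emits one whole line per iteration, with an inner scan that finds the line's break index and a slice/join that renders it.
import Mathlib
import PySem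

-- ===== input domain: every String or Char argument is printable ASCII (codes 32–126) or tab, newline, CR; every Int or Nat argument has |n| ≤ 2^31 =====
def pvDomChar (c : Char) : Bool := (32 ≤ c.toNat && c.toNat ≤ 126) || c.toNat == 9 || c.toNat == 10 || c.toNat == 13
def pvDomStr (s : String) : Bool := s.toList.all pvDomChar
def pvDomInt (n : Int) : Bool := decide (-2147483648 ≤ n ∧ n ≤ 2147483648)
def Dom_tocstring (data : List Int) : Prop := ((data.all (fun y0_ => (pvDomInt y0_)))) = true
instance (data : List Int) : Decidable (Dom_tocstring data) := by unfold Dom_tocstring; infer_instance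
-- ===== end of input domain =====

-- B replaces A's single char-by-char stateful pass by a line-at-a-time outer loop
-- with an inner scan that finds each line's break point; same return value.

-- shared '%o' primitive: Python's '\\%o' % c (octal digits, '-' prefix for negatives)
def pyOct (c : Int) : List Char :=
  if c < 0 then '-' :: Nat.toDigits 8 c.natAbs else Nat.toDigits 8 c.natAbs

def pyEsc (c : Int) : List Char := '\\' :: pyOct c

-- ===== PORT A =====
-- literal transliteration of A's loop: state = (result, line_chars), strings as List Char
def tocstringStepA (st : List Char × Nat) (c : Int) : List Char × Nat :=
  let result := st.1 ++ (if st.2 == 0 then "    \"".toList else [])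
  let s := pyEsc c
  let result := result ++ s
  let line_chars := st.2 + s.length
  if 80 ≤ line_chars then (result ++ "\"\n".toList, 0) else (result, line_chars)

def tocstring (data : List Int) : String :=
  let st := data.foldl tocstringStepA ([], 0)
  String.mk (if st.2 ≠ 0 then st.1 ++ "\"".toList else st.1)

-- ===== PORT B =====
-- B's inner scan 'while j < n and total < 80': consumes escapes while total < 80,
-- returning (joined consumed slice, final total, remaining escapes)
def scanLine : List (List Char) → Nat → List Char × Nat × List (List Char)
  | [], total => ([], total, [])
  | s :: t, total =>
    if total < 80 then
      let r := scanLine t (total + s.length)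
      (s ++ r.1, r.2.1, r.2.2)
    else ([], total, s :: t)

theorem scanLine_rest_le : ∀ (es : List (List Char)) (total : Nat),
    (scanLine es total).2.2.length ≤ es.length := by
  intro es
  induction es with
  | nil => intro total; simp [scanLine]
  | cons s t ih =>
    intro total
    by_cases h : total < 80
    · simp only [scanLine, if_pos h]
      exact le_trans (ih _) (Nat.le_succ _)
    · simp [scanLine, if_neg h]

-- B's outer loop: emit one rendered line per iteration (the first inner-loop
-- iteration always runs since 0 < 80, so it is unrolled into the pattern match)
def buildLines : List (List Char) → List (List Char)
  | [] => []
  | s :: t =>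
    let r := scanLine t (0 + s.length)
    ("    \"".toList ++ s ++ r.1 ++ (if 80 ≤ r.2.1 then "\"\n".toList else "\"".toList))
      :: buildLines r.2.2
termination_by es => es.length
decreasing_by
  exact Nat.lt_succ_of_le (scanLine_rest_le t _)

def tocstring_alt (data : List Int) : String :=
  String.mk (buildLines (data.map pyEsc)).flatten

-- ===== PRECONDITION & SPEC =====
def Spec_tocstring (data : List Int) (out : String) : Prop := out = tocstring_alt data
instance (data : List Int) (out : String) : Decidable (Spec_tocstring data out) := by unfold Spec_tocstring; infer_instance

-- ===== CLAIM (what is proved, stated in full; the proofs are below) =====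
def Claim_equal_tocstring : Prop := ∀ (data : List Int), Dom_tocstring data → Spec_tocstring data (tocstring data)

-- ===== LEMMAS AND PROOFS =====

theorem pyEsc_ne_nil (c : Int) : pyEsc c ≠ [] := by simp [pyEsc]

-- rendering of B's remaining work from a mid-fold state n (< 80)
def restRender (es : List (List Char)) (n : Nat) : List Char :=
  if es = [] ∧ n = 0 then [] else
    let r := scanLine es n
    (if n = 0 then "    \"".toList else []) ++ r.1 ++
      (if 80 ≤ r.2.1 then "\"\n".toList ++ (buildLines r.2.2).flatten else "\"".toList)

theorem scanLine_rest_nil : ∀ (es : List (List Char)) (total : Nat),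
    (scanLine es total).2.1 < 80 → (scanLine es total).2.2 = [] := by
  intro es
  induction es with
  | nil => intro total _; simp [scanLine]
  | cons s t ih =>
    intro total h
    by_cases h80 : total < 80
    · simp only [scanLine, if_pos h80] at h ⊢
      exact ih _ h
    · simp only [scanLine, if_neg h80] at h
      omega

theorem scanLine_big (es : List (List Char)) (total : Nat) (h : 80 ≤ total) :
    scanLine es total = ([], total, es) := by
  cases es with
  | nil => simp [scanLine]
  | cons s t => simp [scanLine, Nat.not_lt.mpr h]

theorem restRender_zero : ∀ (es : List (List Char)), restRender es 0 = (buildLines es).flatten := by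
  intro es
  cases es with
  | nil => simp [restRender, buildLines]
  | cons s t =>
    simp only [restRender, buildLines]
    have h0 : (0 : Nat) < 80 := by norm_num
    simp only [scanLine, if_pos h0, Nat.zero_add]
    by_cases hb : 80 ≤ (scanLine t s.length).2.1
    · simp [hb]
    · have hnil := scanLine_rest_nil t s.length (Nat.lt_of_not_le hb)
      simp [hb, hnil, buildLines]

-- main invariant: from any mid-fold state (r, n) with n < 80, A's remaining fold
-- plus its final-quote step produces r followed by B's rendering of the rest
theorem fold_restRender : ∀ (es : List (List Char)) (n : Nat) (r : List Char),
    n < 80 → (∀ s ∈ es, s ≠ []) →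
    (let st := es.foldl (fun st s =>
        let result := st.1 ++ (if st.2 == 0 then "    \"".toList else []) ++ s
        let line_chars := st.2 + s.length
        if 80 ≤ line_chars then (result ++ "\"\n".toList, 0) else (result, line_chars)) (r, n)
     if st.2 ≠ 0 then st.1 ++ "\"".toList else st.1) = r ++ restRender es n := by
  intro es
  induction es with
  | nil =>
    intro n r hn _
    by_cases h0 : n = 0
    · simp [h0, restRender]
    · simp [h0, restRender, scanLine, Nat.not_le.mpr hn]
  | cons s t ih =>
    intro n r hn hne
    have hs : s ≠ [] := hne s (by simp)
    have hslen : 0 < s.length := List.length_pos_iff.mpr hs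
    simp only [List.foldl_cons]
    by_cases h80 : 80 ≤ n + s.length
    · -- line closes after s
      have := ih 0 (r ++ (if n == 0 then "    \"".toList else []) ++ s ++ "\"\n".toList)
        (by norm_num) (fun x hx => hne x (by simp [hx]))
      simp only [if_pos h80] at *
      rw [this, restRender_zero]
      have hsc : scanLine (s :: t) n = (s ++ [], n + s.length, t) := by
        simp only [scanLine, if_pos hn, scanLine_big t (n + s.length) h80]
      simp only [restRender]
      have hne2 : ¬(s :: t = [] ∧ n = 0) := by simp
      rw [if_neg hne2, hsc]
      simp [h80]
    · -- line stays open
      have hn1 : n + s.length < 80 := Nat.lt_of_not_le h80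
      have hn1ne : n + s.length ≠ 0 := by omega
      have := ih (n + s.length) (r ++ (if n == 0 then "    \"".toList else []) ++ s)
        hn1 (fun x hx => hne x (by simp [hx]))
      simp only [if_neg h80] at *
      rw [this]
      simp only [restRender]
      have hA : ¬(s :: t = [] ∧ n = 0) := by simp
      rw [if_neg hA]
      have hsc : scanLine (s :: t) n =
          (s ++ (scanLine t (n + s.length)).1, (scanLine t (n + s.length)).2) := by
        simp only [scanLine, if_pos hn]
      rw [hsc]
      by_cases ht : t = [] ∧ n + s.length = 0
      · omega
      · rw [if_neg ht]
        simp [hs]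

-- ===== VERDICT (by name: the statement is the Claim_ definition above) =====
theorem tocstring_spec : Claim_equal_tocstring := by
  intro data _
  have h := fold_restRender (data.map pyEsc) 0 [] (by norm_num)
    (by intro x hx; obtain ⟨c, _, rfl⟩ := List.mem_map.mp hx; exact pyEsc_ne_nil c)
  rw [restRender_zero, List.nil_append] at h
  have hfold : data.foldl tocstringStepA ([], 0) =
      (data.map pyEsc).foldl (fun st s =>
        let result := st.1 ++ (if st.2 == 0 then "    \"".toList else []) ++ s
        let line_chars := st.2 + s.length
        if 80 ≤ line_chars then (result ++ "\"\n".toList, 0) else (result, line_chars)) ([], 0) := by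
    rw [List.foldl_map]
    rfl
  show String.mk
      (let st := data.foldl tocstringStepA ([], 0)
       if st.2 ≠ 0 then st.1 ++ "\"".toList else st.1) =
    String.mk (buildLines (data.map pyEsc)).flatten
  rw [hfold]
  exact congrArg String.mk h
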